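-- pv_equiv track=rewrite | github.com/chaukhaivinh/BaiTapLon_AI | ai/src/bot.py | _trace_bresenham_cells
-- ===== SOURCE A (Python) =====
-- def _trace_bresenham_cells(start, end, walls):
--     x0, y0 = start
--     x1, y1 = end
--
--     dx = abs(x1 - x0)
--     dy = -abs(y1 - y0)
--     sx = 1 if x0 < x1 else -1
--     sy = 1 if y0 < y1 else -1
--     err = dx + dy
--
--     visited = []
--     blocked_cell = None
--
--     while True:
--         current = (x0, y0)
--         visited.append(current)
--
--         if current != start and current != end and current in walls:
--             blocked_cell = current
--             break
--
--         if current == end: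
--             break
--
--         e2 = 2 * err
--         if e2 >= dy:
--             err += dy
--             x0 += sx
--         if e2 <= dx:
--             err += dx
--             y0 += sy
--
--     return visited, blocked_cell
-- ===== SOURCE B (Python) =====
-- def _trace_bresenham_cells(start, end, walls):
--     # Chunked build-then-scan: phase 1 builds the next 64 cells of the Bresenham
--     # line with no wall checks; phase 2 scans the chunk against a wall set from
--     # which start and end are removed (they never block).
--     x0, y0 = start
--     x1, y1 = end
--     dx = abs(x1 - x0)
--     dy = -abs(y1 - y0)
--     sx = 1 if x0 < x1 else -1
--     sy = 1 if y0 < y1 else -1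
--     err = dx + dy
--     ws = set(walls)
--     ws.discard(start)
--     ws.discard(end)
--     visited = []
--     while True:
--         chunk = []
--         append = chunk.append
--         reached_end = False
--         for _ in range(64):
--             cur = (x0, y0)
--             append(cur)
--             if cur == end:
--                 reached_end = True
--                 break
--             e2 = 2 * err
--             if e2 >= dy:
--                 err += dy
--                 x0 += sx
--             if e2 <= dx:
--                 err += dx
--                 y0 += sy
--         blocked = None
--         if ws and not ws.isdisjoint(chunk):
--             for i, cell in enumerate(chunk):
--                 if cell in ws:
--                     blocked = (i, cell)
--                     break
--         if blocked is not None: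
--             i, cell = blocked
--             visited.extend(chunk[:i + 1])
--             return visited, cell
--         visited.extend(chunk)
--         if reached_end:
--             return visited, None
-- ===== Notes on version B (the rewrite author's own statement) =====
-- stated objective: alternative
-- what changed: A checks walls cell by cell inside one interleaved Bresenham loop; B builds the line in 64-cell chunks with no wall checks and then scans each chunk against a precomputed wall set (with start/end removed), returning the sliced chunk prefix at the first blocking cell.
import Mathlib
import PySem

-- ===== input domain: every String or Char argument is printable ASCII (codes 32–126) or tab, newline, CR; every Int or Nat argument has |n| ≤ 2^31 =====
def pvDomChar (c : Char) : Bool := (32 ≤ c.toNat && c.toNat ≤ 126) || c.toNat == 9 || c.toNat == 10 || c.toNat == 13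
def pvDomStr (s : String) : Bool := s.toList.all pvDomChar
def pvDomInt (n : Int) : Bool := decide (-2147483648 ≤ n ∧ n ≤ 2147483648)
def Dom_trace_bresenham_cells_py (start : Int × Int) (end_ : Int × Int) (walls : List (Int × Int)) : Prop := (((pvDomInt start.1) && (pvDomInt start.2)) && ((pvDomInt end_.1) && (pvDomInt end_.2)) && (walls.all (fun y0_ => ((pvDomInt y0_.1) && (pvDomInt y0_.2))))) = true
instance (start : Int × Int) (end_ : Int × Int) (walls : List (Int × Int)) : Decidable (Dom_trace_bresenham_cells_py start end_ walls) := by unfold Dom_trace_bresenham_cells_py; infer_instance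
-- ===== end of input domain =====

-- B replaces A's single interleaved trace-and-check loop by a chunked
-- build-then-scan decomposition over a wall set; equivalence is about the return value.

-- ===== PORT A =====
-- A's while-loop, with a fuel bound (the Bresenham trace from (x0,y0) reaches
-- end_ in at most |x1-x0|+|y1-y0| steps, so the fuel only makes it total).
def pvLoopA (start end_ : Int × Int) (walls : List (Int × Int)) (dx dy sx sy : Int) :
    Nat → Int → Int → Int → (List (Int × Int)) × (Option (Int × Int))
  | 0, _, _, _ => ([], none)
  | fuel+1, x0, y0, err =>
    let current := (x0, y0)
    if current ≠ start ∧ current ≠ end_ ∧ current ∈ walls then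
      ([current], some current)
    else if current = end_ then
      ([current], none)
    else
      let e2 := 2 * err
      let err1 := if e2 ≥ dy then err + dy else err
      let x0' := if e2 ≥ dy then x0 + sx else x0
      let err2 := if e2 ≤ dx then err1 + dx else err1
      let y0' := if e2 ≤ dx then y0 + sy else y0
      let r := pvLoopA start end_ walls dx dy sx sy fuel x0' y0' err2
      (current :: r.1, r.2)

def trace_bresenham_cells_py (start : Int × Int) (end_ : Int × Int) (walls : List (Int × Int)) : (List (Int × Int)) × (Option (Int × Int)) :=
  let x0 := start.1
  let y0 := start.2
  let x1 := end_.1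
  let y1 := end_.2
  let dx := |x1 - x0|
  let dy := -|y1 - y0|
  let sx : Int := if x0 < x1 then 1 else -1
  let sy : Int := if y0 < y1 then 1 else -1
  let err := dx + dy
  pvLoopA start end_ walls dx dy sx sy ((x1 - x0).natAbs + (y1 - y0).natAbs + 1) x0 y0 err

-- ===== PORT B =====
-- Phase 1: build the next chunk of the line (no wall checks); returns the
-- chunk and `none` if end_ was reached, else `some` of the updated (x0,y0,err).
def pvBuildChunk (end_ : Int × Int) (dx dy sx sy : Int) :
    Nat → Int → Int → Int → (List (Int × Int)) × (Option (Int × Int × Int))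
  | 0, x0, y0, err => ([], some (x0, y0, err))
  | n+1, x0, y0, err =>
    let current := (x0, y0)
    if current = end_ then
      ([current], none)
    else
      let e2 := 2 * err
      let err1 := if e2 ≥ dy then err + dy else err
      let x0' := if e2 ≥ dy then x0 + sx else x0
      let err2 := if e2 ≤ dx then err1 + dx else err1
      let y0' := if e2 ≤ dx then y0 + sy else y0
      let r := pvBuildChunk end_ dx dy sx sy n x0' y0' err2
      (current :: r.1, r.2)

-- Phase 2 inner scan: first (index, cell) of the chunk that lies in the wall set.
def pvFirstBlock (ws : PySem.Set (Int × Int)) :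
    List (Int × Int) → Option (Nat × (Int × Int))
  | [] => none
  | c :: rest =>
    if c ∈ ws then some (0, c)
    else (pvFirstBlock ws rest).map (fun p => (p.1 + 1, p.2))

-- Outer loop: alternate phase 1 and phase 2 (64-cell chunks, capped by the fuel).
def pvChunkLoop (end_ : Int × Int) (ws : PySem.Set (Int × Int)) (dx dy sx sy : Int) :
    Nat → Int → Int → Int → (List (Int × Int)) × (Option (Int × Int))
  | 0, _, _, _ => ([], none)
  | fuel+1, x0, y0, err =>
    let b := pvBuildChunk end_ dx dy sx sy (min 64 (fuel+1)) x0 y0 err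
    let blocked := if ws ≠ [] ∧ ¬ (PySem.Set.isdisjoint ws b.1 = true)
                   then pvFirstBlock ws b.1 else none
    match blocked with
    | some (i, c) => (b.1.take (i + 1), some c)
    | none =>
      match b.2 with
      | none => (b.1, none)
      | some (x0', y0', err') =>
        let r := pvChunkLoop end_ ws dx dy sx sy (fuel + 1 - min 64 (fuel+1)) x0' y0' err'
        (b.1 ++ r.1, r.2)
  termination_by fuel => fuel
  decreasing_by omega

def trace_bresenham_cells_py_alt (start : Int × Int) (end_ : Int × Int) (walls : List (Int × Int)) : (List (Int × Int)) × (Option (Int × Int)) :=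
  let x0 := start.1
  let y0 := start.2
  let x1 := end_.1
  let y1 := end_.2
  let dx := |x1 - x0|
  let dy := -|y1 - y0|
  let sx : Int := if x0 < x1 then 1 else -1
  let sy : Int := if y0 < y1 then 1 else -1
  let err := dx + dy
  let ws := PySem.Set.discard (PySem.Set.discard (PySem.Set.ofList walls) start) end_
  pvChunkLoop end_ ws dx dy sx sy ((x1 - x0).natAbs + (y1 - y0).natAbs + 1) x0 y0 err

-- ===== PRECONDITION & SPEC =====
def Spec_trace_bresenham_cells_py (start : Int × Int) (end_ : Int × Int) (walls : List (Int × Int)) (out : (List (Int × Int)) × (Option (Int × Int))) : Prop := out = trace_bresenham_cells_py_alt start end_ walls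
instance (start : Int × Int) (end_ : Int × Int) (walls : List (Int × Int)) (out : (List (Int × Int)) × (Option (Int × Int))) : Decidable (Spec_trace_bresenham_cells_py start end_ walls out) := by unfold Spec_trace_bresenham_cells_py; infer_instance

-- ===== CLAIM (what is proved, stated in full; the proofs are below) =====
def Claim_equal_trace_bresenham_cells_py : Prop := ∀ (start : Int × Int) (end_ : Int × Int) (walls : List (Int × Int)), Dom_trace_bresenham_cells_py start end_ walls → Spec_trace_bresenham_cells_py start end_ walls (trace_bresenham_cells_py start end_ walls)

-- ===== LEMMAS AND PROOFS =====
-- Proof-side scan with A's blocking condition spelled out.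
def pvScanA (start end_ : Int × Int) (walls : List (Int × Int)) :
    List (Int × Int) → Option (Nat × (Int × Int))
  | [] => none
  | c :: rest =>
    if c ≠ start ∧ c ≠ end_ ∧ c ∈ walls then some (0, c)
    else (pvScanA start end_ walls rest).map (fun p => (p.1 + 1, p.2))

theorem pvScanA_eq_none (start end_ : Int × Int) (walls : List (Int × Int)) :
    ∀ l : List (Int × Int), (∀ c ∈ l, ¬ (c ≠ start ∧ c ≠ end_ ∧ c ∈ walls)) →
      pvScanA start end_ walls l = none := by
  intro l
  induction l with
  | nil => intro _; simp [pvScanA]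
  | cons c rest ih =>
    intro h
    have hc := h c (by simp)
    simp only [pvScanA, if_neg hc, ih (fun d hd => h d (by simp [hd])), Option.map_none]

theorem pvFirstBlock_congr (start end_ : Int × Int) (walls : List (Int × Int))
    (ws : PySem.Set (Int × Int))
    (hmem : ∀ c, c ∈ ws ↔ (c ≠ start ∧ c ≠ end_ ∧ c ∈ walls)) :
    ∀ l : List (Int × Int), pvFirstBlock ws l = pvScanA start end_ walls l := by
  intro l
  induction l with
  | nil => simp [pvFirstBlock, pvScanA]
  | cons c rest ih =>
    simp only [pvFirstBlock, pvScanA, ih]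
    by_cases hc : c ∈ ws
    · rw [if_pos hc, if_pos ((hmem c).mp hc)]
    · rw [if_neg hc, if_neg (fun h => hc ((hmem c).mpr h))]

theorem pvBlocked_eq (start end_ : Int × Int) (walls : List (Int × Int))
    (ws : PySem.Set (Int × Int))
    (hmem : ∀ c, c ∈ ws ↔ (c ≠ start ∧ c ≠ end_ ∧ c ∈ walls))
    (l : List (Int × Int)) :
    (if ws ≠ [] ∧ ¬ (PySem.Set.isdisjoint ws l = true)
     then pvFirstBlock ws l else none) = pvScanA start end_ walls l := by
  by_cases hg : ws ≠ [] ∧ ¬ (PySem.Set.isdisjoint ws l = true)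
  · rw [if_pos hg, pvFirstBlock_congr start end_ walls ws hmem]
  · rw [if_neg hg]
    have hnone : ∀ c ∈ l, ¬ (c ≠ start ∧ c ≠ end_ ∧ c ∈ walls) := by
      intro c hcl hcond
      have hcw : c ∈ ws := (hmem c).mpr hcond
      rcases not_and_or.mp hg with h1 | h2
      · have : ws = [] := not_not.mp h1
        rw [this] at hcw; simp at hcw
      · have hdis := not_not.mp h2
        exact (PySem.Set.isdisjoint_iff ws l).mp hdis c hcw hcl
    exact (pvScanA_eq_none start end_ walls l hnone).symm

-- Decomposition: A's loop on m+n fuel = build a chunk of m cells, scan it,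
-- and continue A's loop on the remaining fuel from the chunk's final state.
theorem pvLoopA_decompose (start end_ : Int × Int) (walls : List (Int × Int))
    (dx dy sx sy : Int) :
    ∀ (m n : Nat) (x0 y0 err : Int),
      pvLoopA start end_ walls dx dy sx sy (m + n) x0 y0 err =
        (let b := pvBuildChunk end_ dx dy sx sy m x0 y0 err
         match pvScanA start end_ walls b.1 with
         | some (i, c) => (b.1.take (i + 1), some c)
         | none =>
           match b.2 with
           | none => (b.1, none)
           | some (x0', y0', err') =>
             let r := pvLoopA start end_ walls dx dy sx sy n x0' y0' err'
             (b.1 ++ r.1, r.2)) := by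
  intro m
  induction m with
  | zero => intro n x0 y0 err; simp [pvBuildChunk, pvScanA]
  | succ m ih =>
    intro n x0 y0 err
    by_cases hb : (x0, y0) ≠ start ∧ (x0, y0) ≠ end_ ∧ (x0, y0) ∈ walls
    · have hne : (x0, y0) ≠ end_ := hb.2.1
      have hfa : m + 1 + n = (m + n) + 1 := by omega
      rw [hfa]
      simp only [pvLoopA, pvBuildChunk, if_pos hb, if_neg hne, pvScanA]
      simp
    · by_cases he : (x0, y0) = end_
      · have hfa : m + 1 + n = (m + n) + 1 := by omega
        rw [hfa]
        simp only [pvLoopA, pvBuildChunk, if_neg hb, if_pos he, pvScanA]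
        simp
      · have hfa : m + 1 + n = (m + n) + 1 := by omega
        rw [hfa]
        simp only [pvLoopA, pvBuildChunk, if_neg hb, if_neg he, pvScanA, ih]
        cases pvScanA start end_ walls
            (pvBuildChunk end_ dx dy sx sy m
              (if 2 * err ≥ dy then x0 + sx else x0)
              (if 2 * err ≤ dx then y0 + sy else y0)
              (if 2 * err ≤ dx then (if 2 * err ≥ dy then err + dy else err) + dx
               else (if 2 * err ≥ dy then err + dy else err))).1 with
        | none =>
          simp only [Option.map_none]
          cases hb2 : (pvBuildChunk end_ dx dy sx sy m
              (if 2 * err ≥ dy then x0 + sx else x0)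
              (if 2 * err ≤ dx then y0 + sy else y0)
              (if 2 * err ≤ dx then (if 2 * err ≥ dy then err + dy else err) + dx
               else (if 2 * err ≥ dy then err + dy else err))).2 with
          | none => simp
          | some st => cases st with | mk a bc => cases bc with | mk b c => simp
        | some p =>
          cases p with | mk i c =>
          simp only [Option.map_some]
          simp [List.take_succ_cons]

-- B's chunked loop equals A's loop, for every fuel and start state.
theorem pvChunkLoop_eq_loopA (start end_ : Int × Int) (walls : List (Int × Int))
    (ws : PySem.Set (Int × Int))
    (hmem : ∀ c, c ∈ ws ↔ (c ≠ start ∧ c ≠ end_ ∧ c ∈ walls))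
    (dx dy sx sy : Int) :
    ∀ (fuel : Nat) (x0 y0 err : Int),
      pvChunkLoop end_ ws dx dy sx sy fuel x0 y0 err =
        pvLoopA start end_ walls dx dy sx sy fuel x0 y0 err := by
  intro fuel
  induction fuel using Nat.strong_induction_on with
  | _ fuel ih =>
    intro x0 y0 err
    match fuel with
    | 0 => simp [pvChunkLoop, pvLoopA]
    | f+1 =>
      have hsplit : f + 1 = min 64 (f+1) + (f + 1 - min 64 (f+1)) := by omega
      rw [pvChunkLoop]
      conv_rhs => rw [hsplit]
      rw [pvLoopA_decompose]
      simp only [pvBlocked_eq start end_ walls ws hmem]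
      cases pvScanA start end_ walls
          (pvBuildChunk end_ dx dy sx sy (min 64 (f+1)) x0 y0 err).1 with
      | some p => rfl
      | none =>
        cases hb2 : (pvBuildChunk end_ dx dy sx sy (min 64 (f+1)) x0 y0 err).2 with
        | none => simp
        | some st =>
          cases st with | mk a bc =>
          cases bc with | mk b c =>
          simp only [ih (f + 1 - min 64 (f+1)) (by omega)]

-- ===== VERDICT (by name: the statement is the Claim_ definition above) =====
theorem trace_bresenham_cells_py_spec : Claim_equal_trace_bresenham_cells_py := by
  intro start end_ walls _
  unfold Spec_trace_bresenham_cells_py trace_bresenham_cells_py trace_bresenham_cells_py_alt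
  rw [pvChunkLoop_eq_loopA start end_ walls _
    (by intro c
        simp only [PySem.Set.mem_discard, PySem.Set.mem_ofList]
        tauto)]
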